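-- pv_equiv track=rewrite | github.com/krichelj/Python-Homework-Grader | examples/ass_1/Assignment_1/107643Aex1_206828097.py | isSumDivided
-- ===== SOURCE A (Python) =====
-- def isSumDivided(x):
--     sumx = 0
--     while x:
--         sumx, x = sumx + x % 10, x // 10 #Sum the digits in the number
--     sumdiv = sumx + 1
--     while sumx: #Keep running until break
--         if((sumdiv)%sumx > 0):  #Check when the lowest dividier of the sumx
--             sumdiv=sumdiv+1
--         else:
--             break
--     return(sumdiv)
-- ===== SOURCE B (Python) =====
-- def _digit_sum(x):
--     return 0 if x == 0 else x % 10 + _digit_sum(x // 10)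
--
-- def isSumDivided(x):
--     s = _digit_sum(x)
--     return 2 * s if s else 1
-- ===== Notes on version B (the rewrite author's own statement) =====
-- stated objective: simpler
-- what changed: B computes the digit sum by direct recursion and replaces A's incremental search for the next larger multiple of the digit sum with a closed form (twice the digit sum, with the unit answer when the digit sum vanishes).
import Mathlib
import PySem

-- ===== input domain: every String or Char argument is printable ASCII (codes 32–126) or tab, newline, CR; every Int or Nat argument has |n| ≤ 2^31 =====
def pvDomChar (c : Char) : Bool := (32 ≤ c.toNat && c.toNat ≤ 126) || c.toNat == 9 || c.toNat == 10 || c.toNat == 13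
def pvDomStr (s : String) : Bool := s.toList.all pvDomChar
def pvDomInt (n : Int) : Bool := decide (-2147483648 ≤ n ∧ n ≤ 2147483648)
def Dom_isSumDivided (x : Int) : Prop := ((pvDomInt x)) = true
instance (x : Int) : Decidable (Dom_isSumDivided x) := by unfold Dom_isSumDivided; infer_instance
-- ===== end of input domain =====

-- B replaces A's incremental search for the next larger multiple of the digit sum by a closed
-- form, and computes the digit sum by direct recursion instead of a while loop.

-- ===== PORT A =====
-- 'while x: sumx, x = sumx + x % 10, x // 10'; for x < 0 the Python loop never terminates,
-- so the guard is '0 < x' only to make the Lean function total (x < 0 is excluded by Pre_).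
def pvLoopA (sumx x : Int) : Int :=
  if _h : 0 < x then
    pvLoopA (sumx + PySem.Int.mod x 10) (PySem.Int.floordiv x 10)
  else sumx
termination_by x.toNat
decreasing_by
  rw [PySem.Int.floordiv_eq_ediv_of_pos (by norm_num : (0:Int) < 10)]
  omega

-- 'while sumx: if sumdiv % sumx > 0: sumdiv += 1 else: break'; fuel only makes it total,
-- the Python loop stops within sumx.toNat steps on every input Pre_ admits.
def pvLoop2 : Nat → Int → Int → Int
  | 0, sumdiv, _ => sumdiv
  | f + 1, sumdiv, sumx =>
    if sumx ≠ 0 then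
      if PySem.Int.mod sumdiv sumx > 0 then pvLoop2 f (sumdiv + 1) sumx else sumdiv
    else sumdiv

def isSumDivided (x : Int) : Int :=
  let sumx := pvLoopA 0 x
  let sumdiv := sumx + 1
  pvLoop2 sumx.toNat sumdiv sumx

-- ===== PORT B =====
-- '_digit_sum(x) = 0 if x == 0 else x % 10 + _digit_sum(x // 10)'; for x < 0 the Python
-- recursion never terminates, so the guard is '0 < x' only for totality (excluded by Pre_).
def pvDigitSum (x : Int) : Int :=
  if _h : 0 < x then PySem.Int.mod x 10 + pvDigitSum (PySem.Int.floordiv x 10) else 0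
termination_by x.toNat
decreasing_by
  rw [PySem.Int.floordiv_eq_ediv_of_pos (by norm_num : (0:Int) < 10)]
  omega

def isSumDivided_alt (x : Int) : Int :=
  let s := pvDigitSum x
  if s ≠ 0 then 2 * s else 1

-- ===== PRECONDITION & SPEC =====
-- Pre_ excludes x < 0, on which both A's while-loop and B's recursion never terminate
-- (x // 10 stays -1 forever): A returns on exactly the inputs with 0 ≤ x.
def Pre_isSumDivided (x : Int) : Prop := 0 ≤ x
instance (x : Int) : Decidable (Pre_isSumDivided x) := by unfold Pre_isSumDivided; infer_instance
def pvWitness_isSumDivided : Int := 12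

def Spec_isSumDivided (x : Int) (out : Int) : Prop := out = isSumDivided_alt x
instance (x : Int) (out : Int) : Decidable (Spec_isSumDivided x out) := by unfold Spec_isSumDivided; infer_instance

-- ===== CLAIM (what is proved, stated in full; the proofs are below) =====
def Claim_equal_isSumDivided : Prop := ∀ (x : Int), Dom_isSumDivided x → Pre_isSumDivided x → Spec_isSumDivided x (isSumDivided x)

-- ===== LEMMAS AND PROOFS =====

theorem pvLoopA_eq (sumx x : Int) : pvLoopA sumx x = sumx + pvDigitSum x := by
  induction sumx, x using pvLoopA.induct with
  | case1 sumx x h ih =>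
    rw [pvLoopA, pvDigitSum, dif_pos h, dif_pos h, ih]; ring
  | case2 sumx x h =>
    rw [pvLoopA, pvDigitSum, dif_neg h, dif_neg h]; ring

theorem pvDigitSum_nonneg (x : Int) : 0 ≤ pvDigitSum x := by
  induction x using pvDigitSum.induct with
  | case1 x h ih =>
    rw [pvDigitSum, dif_pos h]
    have hm : 0 ≤ PySem.Int.mod x 10 := by
      rw [PySem.Int.mod_eq_emod_of_pos (by norm_num : (0:Int) < 10)]
      exact Int.emod_nonneg x (by norm_num)
    omega
  | case2 x h => rw [pvDigitSum, dif_neg h]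

theorem pvDigitSum_pos (x : Int) (hx : 0 < x) : 0 < pvDigitSum x := by
  induction x using pvDigitSum.induct with
  | case1 x h ih =>
    rw [pvDigitSum, dif_pos h]
    rw [PySem.Int.mod_eq_emod_of_pos (by norm_num : (0:Int) < 10),
        PySem.Int.floordiv_eq_ediv_of_pos (by norm_num : (0:Int) < 10)] at *
    have hdm := Int.mul_ediv_add_emod x 10
    have hm : 0 ≤ x % 10 := Int.emod_nonneg x (by norm_num)
    by_cases hz : x % 10 = 0
    · have hq : 0 < x / 10 := by omega
      have := ih hq
      have := pvDigitSum_nonneg (x / 10)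
      -- note: ih already rewritten; combine
      omega
    · have := pvDigitSum_nonneg (x / 10)
      omega
  | case2 x h => omega

theorem pvLoop2_eq (fuel : Nat) (s d : Int) (hs : 0 < s) (h1 : s < d) (h2 : d ≤ 2 * s)
    (hf : (2 * s - d).toNat ≤ fuel) : pvLoop2 fuel d s = 2 * s := by
  induction fuel generalizing d with
  | zero =>
    have : d = 2 * s := by omega
    simpa [pvLoop2] using this
  | succ f ih =>
    have hsne : s ≠ 0 := by omega
    rw [pvLoop2, if_pos hsne,
        PySem.Int.mod_eq_emod_of_pos hs]
    by_cases he : d = 2 * s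
    · subst he
      have : (2 * s) % s = 0 := Int.mul_emod_left 2 s
      simp [this]
    · have hlt : d < 2 * s := by omega
      have hm : d % s = d - s := by
        have := Int.sub_emod_right d s
        rw [← this]
        exact Int.emod_eq_of_lt (by omega) (by omega)
      rw [if_pos (by omega)]
      exact ih (d + 1) (by omega) (by omega) (by omega)

-- ===== VERDICT (by name: the statement is the Claim_ definition above) =====
theorem isSumDivided_spec : Claim_equal_isSumDivided := by
  intro x _ hpre
  unfold Pre_isSumDivided at hpre
  unfold Spec_isSumDivided isSumDivided isSumDivided_alt
  have hA : pvLoopA 0 x = pvDigitSum x := by rw [pvLoopA_eq]; ring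
  rw [hA]
  by_cases hx : 0 < x
  · have hs : 0 < pvDigitSum x := pvDigitSum_pos x hx
    rw [if_pos (by omega : pvDigitSum x ≠ 0)]
    exact pvLoop2_eq _ _ _ hs (by omega) (by omega) (by omega)
  · have hx0 : x = 0 := by omega
    subst hx0
    have h0 : pvDigitSum 0 = 0 := by rw [pvDigitSum]; simp
    rw [h0]
    simp [pvLoop2]
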